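-- pv_equiv track=rewrite | github.com/Wojti-7/logia | Inne/kolejna.py | kolejna1
-- ===== SOURCE A (Python) =====
-- def zawiera3(liczba):
--     napis = str(liczba)
--     for i in range(0, len(napis), 1):
--         if (int(napis[i]) == 3):
--             return True
--     return False
--
-- def kolejna1(p, w):
--     licznik = 0
--     for i in range(p+1, 1000000, 1):
--         if not zawiera3(i):
--             licznik = licznik + 1
--             if (licznik == w):
--                 return i
--     return 0
-- ===== SOURCE B (Python) =====
-- # Rank/unrank over 3-free numbers via the base-9 digit bijection: count the
-- # 3-free numbers <= p with a digit formula, add w, and map the rank back.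
-- def _free(n):
--     # n's decimal digits avoid 3
--     return n == 0 or (n % 10 != 3 and _free(n // 10))
--
-- def _count_free(n):
--     # number of 3-free integers in [0, n)
--     if n == 0:
--         return 0
--     q, d = divmod(n, 10)
--     return 9 * _count_free(q) + ((d - (1 if d > 3 else 0)) if _free(q) else 0)
--
-- def kolejna1(p, w):
--     if w < 1:
--         return 0
--     c = _count_free(p + 1) if p >= 0 else 0
--     k = c + w - 1
--     # k-th (0-indexed) 3-free number: base-9 digits of k, skipping digit 3
--     ans, mult = 0, 1
--     while k:
--         k, e = divmod(k, 9)
--         ans += (e if e < 3 else e + 1) * mult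
--         mult *= 10
--     return ans if ans < 1000000 else 0
-- ===== Notes on version B (the rewrite author's own statement) =====
-- stated objective: alternative
-- what changed: Replaces the linear scan that tests every integer's decimal string for a '3' with O(digits) arithmetic: a digit-DP counts the 3-free numbers up to p, and the answer is obtained by writing that rank plus w in base 9 and mapping each base-9 digit to a non-3 decimal digit (the order-preserving bijection between naturals and 3-free numbers); intended as faster, a timing run measured ~1000x on scan-heavy inputs but ~1x where A's loop is empty, so no uniform speed claim is made.
import Mathlib
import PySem

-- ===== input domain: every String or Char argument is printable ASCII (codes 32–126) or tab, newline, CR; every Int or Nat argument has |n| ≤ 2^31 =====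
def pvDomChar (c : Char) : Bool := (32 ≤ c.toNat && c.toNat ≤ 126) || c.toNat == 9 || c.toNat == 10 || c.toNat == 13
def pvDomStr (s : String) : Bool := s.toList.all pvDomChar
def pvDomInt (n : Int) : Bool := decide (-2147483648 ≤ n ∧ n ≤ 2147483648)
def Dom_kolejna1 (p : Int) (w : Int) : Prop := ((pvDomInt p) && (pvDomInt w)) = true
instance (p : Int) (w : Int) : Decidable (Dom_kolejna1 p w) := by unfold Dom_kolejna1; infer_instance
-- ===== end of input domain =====

-- B replaces A's linear scan with O(digits) rank/unrank arithmetic over the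
-- base-9 bijection onto 3-free numbers (objective: alternative algorithm).

-- ===== PORT A =====

-- zawiera3's for-loop over the character indices; 'none' models a Python
-- exception (IndexError is unreachable, ValueError = int('-') happens only
-- for negative arguments, which Pre_kolejna1 excludes).
def zawiera3Loop (napis : String) : List Int → Option Bool
  | [] => some false
  | i :: rest =>
    match PySem.Str.pyGet? napis i with
    | none => none
    | some c =>
      match PySem.Int.ofChars? [c] with
      | none => none
      | some v => if v = 3 then some true else zawiera3Loop napis rest

def zawiera3 (liczba : Int) : Option Bool :=
  let napis := PySem.Int.toStr liczba
  zawiera3Loop napis (PySem.List.pyRange 0 (PySem.Str.len napis) 1)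

-- the for-loop of kolejna1: fuel = number of remaining loop iterations,
-- i the loop variable, licznik the counter; 'none' from zawiera3 (a Python
-- exception, excluded by Pre_kolejna1) aborts with 0.
def kolejna1Loop (w : Int) : Int → Int → Nat → Int
  | _, _, 0 => 0
  | licznik, i, fuel + 1 =>
    match zawiera3 i with
    | none => 0
    | some true => kolejna1Loop w licznik (i + 1) fuel
    | some false =>
      if licznik + 1 = w then i else kolejna1Loop w (licznik + 1) (i + 1) fuel

def kolejna1 (p : Int) (w : Int) : Int :=
  kolejna1Loop w 0 (p + 1) (1000000 - (p + 1)).toNat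

-- ===== PORT B =====

-- Source B's _free (its int argument is nonnegative at every call, ported as Nat;
-- the first Nat is structural fuel ≥ n, making the recursion n → n/10 total)
def bFreeAux : Nat → Nat → Bool
  | _, 0 => true
  | 0, _ + 1 => true
  | fuel + 1, n + 1 => ((n + 1) % 10 != 3) && bFreeAux fuel ((n + 1) / 10)

def bFree (n : Nat) : Bool := bFreeAux n n

-- Source B's _count_free (argument p+1 ≥ 0 at its only guarded call site); same fuel pattern
def bCountFreeAux : Nat → Nat → Nat
  | _, 0 => 0
  | 0, _ + 1 => 0
  | fuel + 1, n + 1 =>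
    9 * bCountFreeAux fuel ((n + 1) / 10) +
      (if bFree ((n + 1) / 10) then (n + 1) % 10 - (if 3 < (n + 1) % 10 then 1 else 0) else 0)

def bCountFree (n : Nat) : Nat := bCountFreeAux n n

-- Source B's while-loop (k = c + w - 1 ≥ 0 under the w < 1 guard, ported as Nat; same fuel pattern)
def bUnrankAux : Nat → Nat → Int → Int → Int
  | _, 0, ans, _ => ans
  | 0, _ + 1, ans, _ => ans
  | fuel + 1, k + 1, ans, mult =>
    bUnrankAux fuel ((k + 1) / 9)
      (ans + (if ((k + 1) % 9 : Int) < 3 then ((k + 1) % 9 : Int) else ((k + 1) % 9 : Int) + 1) * mult)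
      (mult * 10)

def bUnrankLoop (k : Nat) (ans : Int) (mult : Int) : Int := bUnrankAux k k ans mult

def kolejna1_alt (p : Int) (w : Int) : Int :=
  if w < 1 then 0
  else
    let c : Int := if 0 ≤ p then (bCountFree (p + 1).toNat : Int) else 0
    let k : Int := c + w - 1
    let ans := bUnrankLoop k.toNat 0 1
    if ans < 1000000 then ans else 0

-- ===== PRECONDITION & SPEC =====
-- For p ≤ -2 the loop starts at a negative i and str(i) begins with '-', so
-- int(napis[0]) raises ValueError: A raises there, hence excluded.
def Pre_kolejna1 (p : Int) (w : Int) : Prop := -1 ≤ p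
instance (p : Int) (w : Int) : Decidable (Pre_kolejna1 p w) := by unfold Pre_kolejna1; infer_instance
def pvWitness_kolejna1 : Int × Int := (5, 2)

def Spec_kolejna1 (p : Int) (w : Int) (out : Int) : Prop := out = kolejna1_alt p w
instance (p : Int) (w : Int) (out : Int) : Decidable (Spec_kolejna1 p w out) := by unfold Spec_kolejna1; infer_instance

-- ===== CLAIM (what is proved, stated in full; the proofs are below) =====
def Claim_equal_kolejna1 : Prop := ∀ (p : Int) (w : Int), Dom_kolejna1 p w → Pre_kolejna1 p w → Spec_kolejna1 p w (kolejna1 p w)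
-- ===== LEMMAS AND PROOFS =====

-- ---- the mathematical enumeration u of the 3-free numbers ----

-- digit map {0..8} → {0..9}\{3}
def md (e : Nat) : Nat := if e < 3 then e else e + 1

-- u k = the k-th (0-indexed) 3-free number: base-9 digits of k mapped by md
def u (k : Nat) : Nat :=
  if k = 0 then 0 else 10 * u (k / 9) + md (k % 9)
  decreasing_by exact Nat.div_lt_self (Nat.pos_of_ne_zero (by assumption)) (by norm_num)

-- count of 3-free numbers below n
def cnt (n : Nat) : Nat := Nat.count (fun m => bFree m = true) n

lemma bFreeAux_congr (f1 : Nat) : ∀ n f2, n ≤ f1 → n ≤ f2 → bFreeAux f1 n = bFreeAux f2 n := by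
  induction f1 with
  | zero =>
    intro n f2 h1 _
    have hn : n = 0 := by omega
    subst hn; cases f2 <;> simp [bFreeAux]
  | succ f ih =>
    intro n f2 h1 h2
    match n, f2 with
    | 0, f2 => cases f2 <;> simp [bFreeAux]
    | n + 1, f2 + 1 =>
      have hd : (n + 1) / 10 < n + 1 := Nat.div_lt_self (Nat.succ_pos n) (by norm_num)
      simp only [bFreeAux]
      rw [ih ((n + 1) / 10) f2 (by omega) (by omega)]

lemma bFree_rec (n : Nat) (h : n ≠ 0) : bFree n = ((n % 10 != 3) && bFree (n / 10)) := by
  obtain ⟨m, rfl⟩ : ∃ m, n = m + 1 := ⟨n - 1, by omega⟩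
  have hd : (m + 1) / 10 < m + 1 := Nat.div_lt_self (Nat.succ_pos m) (by norm_num)
  show bFreeAux (m + 1) (m + 1) = _
  simp only [bFreeAux]
  rw [bFreeAux_congr m ((m + 1) / 10) ((m + 1) / 10) (by omega) le_rfl]
  rfl

lemma bCountFreeAux_congr (f1 : Nat) : ∀ n f2, n ≤ f1 → n ≤ f2 → bCountFreeAux f1 n = bCountFreeAux f2 n := by
  induction f1 with
  | zero =>
    intro n f2 h1 _
    have hn : n = 0 := by omega
    subst hn; cases f2 <;> simp [bCountFreeAux]
  | succ f ih =>
    intro n f2 h1 h2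
    match n, f2 with
    | 0, f2 => cases f2 <;> simp [bCountFreeAux]
    | n + 1, f2 + 1 =>
      have hd : (n + 1) / 10 < n + 1 := Nat.div_lt_self (Nat.succ_pos n) (by norm_num)
      simp only [bCountFreeAux]
      rw [ih ((n + 1) / 10) f2 (by omega) (by omega)]

lemma bCountFree_rec (n : Nat) (h : n ≠ 0) :
    bCountFree n = 9 * bCountFree (n / 10) +
      (if bFree (n / 10) then n % 10 - (if 3 < n % 10 then 1 else 0) else 0) := by
  obtain ⟨m, rfl⟩ : ∃ m, n = m + 1 := ⟨n - 1, by omega⟩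
  have hd : (m + 1) / 10 < m + 1 := Nat.div_lt_self (Nat.succ_pos m) (by norm_num)
  show bCountFreeAux (m + 1) (m + 1) = _
  simp only [bCountFreeAux]
  rw [bCountFreeAux_congr m ((m + 1) / 10) ((m + 1) / 10) (by omega) le_rfl]
  rfl

lemma bUnrankAux_congr (f1 : Nat) : ∀ k f2 ans mult, k ≤ f1 → k ≤ f2 →
    bUnrankAux f1 k ans mult = bUnrankAux f2 k ans mult := by
  induction f1 with
  | zero =>
    intro k f2 ans mult h1 _
    have hk : k = 0 := by omega
    subst hk; cases f2 <;> simp [bUnrankAux]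
  | succ f ih =>
    intro k f2 ans mult h1 h2
    match k, f2 with
    | 0, f2 => cases f2 <;> simp [bUnrankAux]
    | k + 1, f2 + 1 =>
      have hd : (k + 1) / 9 < k + 1 := Nat.div_lt_self (Nat.succ_pos k) (by norm_num)
      simp only [bUnrankAux]
      rw [ih ((k + 1) / 9) f2 _ _ (by omega) (by omega)]

lemma bUnrankLoop_rec (k : Nat) (ans mult : Int) (h : k ≠ 0) :
    bUnrankLoop k ans mult =
      bUnrankLoop (k / 9)
        (ans + (if ((k % 9 : Nat) : Int) < 3 then ((k % 9 : Nat) : Int) else ((k % 9 : Nat) : Int) + 1) * mult)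
        (mult * 10) := by
  obtain ⟨m, rfl⟩ : ∃ m, k = m + 1 := ⟨k - 1, by omega⟩
  have hd : (m + 1) / 9 < m + 1 := Nat.div_lt_self (Nat.succ_pos m) (by norm_num)
  show bUnrankAux (m + 1) (m + 1) _ _ = _
  simp only [bUnrankAux]
  rw [bUnrankAux_congr m ((m + 1) / 9) ((m + 1) / 9) _ _ (by omega) le_rfl]
  rfl

lemma bFree_iff (n : Nat) : bFree n = true ↔ 3 ∉ Nat.digits 10 n := by
  induction n using Nat.strong_induction_on with
  | _ n ih =>
    rcases Nat.eq_zero_or_pos n with hn | hn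
    · subst hn; simp [bFree, bFreeAux]
    · have hd : n / 10 < n := Nat.div_lt_self hn (by norm_num)
      rw [bFree_rec n (by omega), Nat.digits_def' (by norm_num : (1:Nat) < 10) hn]
      simp [ih (n / 10) hd]
      tauto

lemma md_lt_ten (e : Nat) (h : e < 9) : md e < 10 := by
  unfold md; split <;> omega

lemma md_ne_three (e : Nat) : md e ≠ 3 := by
  unfold md; split <;> omega

lemma u_rec (k : Nat) : u k = if k = 0 then 0 else 10 * u (k / 9) + md (k % 9) := by
  rw [u]

lemma u_zero : u 0 = 0 := by rw [u_rec]; simp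

lemma u_pos (k : Nat) (hk : k ≠ 0) : 0 < u k := by
  induction k using Nat.strong_induction_on with
  | _ k ih =>
    rw [u_rec, if_neg hk]
    rcases Nat.eq_zero_or_pos (k / 9) with h9 | h9
    · have hr : k % 9 ≠ 0 := by omega
      unfold md; split <;> omega
    · have := ih (k / 9) (Nat.div_lt_self (Nat.pos_of_ne_zero hk) (by norm_num)) (by omega)
      omega

lemma u_free (k : Nat) : bFree (u k) = true := by
  induction k using Nat.strong_induction_on with
  | _ k ih =>
    rcases Nat.eq_zero_or_pos k with hk | hk
    · subst hk; rw [u_zero]; rfl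
    · have hk' : k ≠ 0 := by omega
      have heq : u k = 10 * u (k / 9) + md (k % 9) := by rw [u_rec, if_neg hk']
      have hmd : md (k % 9) < 10 := md_lt_ten _ (by omega)
      have hne : md (k % 9) ≠ 3 := md_ne_three _
      have hupos : 0 < u k := u_pos k hk'
      rw [bFree_rec (u k) (by omega)]
      have h1 : u k % 10 = md (k % 9) := by omega
      have h2 : u k / 10 = u (k / 9) := by omega
      rw [h1, h2, ih (k / 9) (Nat.div_lt_self hk (by norm_num))]
      simp [hne]

lemma u_lt_u (l : Nat) : ∀ k, k < l → u k < u l := by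
  induction l using Nat.strong_induction_on with
  | _ l ih =>
    intro k hk
    have hl : l ≠ 0 := by omega
    rcases Nat.eq_zero_or_pos k with hk0 | hk0
    · subst hk0; rw [u_zero]; exact u_pos l hl
    · have hk' : k ≠ 0 := by omega
      have hUk : u k = 10 * u (k / 9) + md (k % 9) := by rw [u_rec, if_neg hk']
      have hUl : u l = 10 * u (l / 9) + md (l % 9) := by rw [u_rec, if_neg hl]
      have hqle : k / 9 ≤ l / 9 := Nat.div_le_div_right (by omega)
      rcases Nat.lt_or_ge (k / 9) (l / 9) with hq | hq
      · have hql : u (k / 9) < u (l / 9) :=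
          ih (l / 9) (Nat.div_lt_self (by omega) (by norm_num)) (k / 9) hq
        have h1 : md (k % 9) < 10 := md_lt_ten _ (by omega)
        omega
      · have hqeq : k / 9 = l / 9 := by omega
        rw [hqeq] at hUk
        have hrlt : k % 9 < l % 9 := by omega
        have hmd : md (k % 9) < md (l % 9) := by unfold md; split_ifs <;> omega
        omega

lemma u_strictMono {k l : Nat} (h : k < l) : u k < u l := u_lt_u l k h

lemma u_mono {k l : Nat} (h : k ≤ l) : u k ≤ u l := by
  rcases Nat.lt_or_ge k l with h' | h'
  · exact le_of_lt (u_strictMono h')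
  · have : k = l := le_antisymm h h'
    simp [this]

lemma u_lt_iff {k l : Nat} : u k < u l ↔ k < l := by
  constructor
  · intro h
    by_contra hn
    exact absurd (u_mono (by omega : l ≤ k)) (by omega)
  · exact u_strictMono

lemma u_surj (n : Nat) (hn : bFree n = true) : ∃ k, u k = n := by
  induction n using Nat.strong_induction_on with
  | _ n ih =>
    rcases Nat.eq_zero_or_pos n with h0 | h0
    · exact ⟨0, by rw [u_zero, h0]⟩
    · rw [bFree_rec n (by omega)] at hn
      simp only [Bool.and_eq_true, bne_iff_ne, ne_eq] at hn
      obtain ⟨hd3, hfq⟩ := hn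
      obtain ⟨k', hk'⟩ := ih (n / 10) (Nat.div_lt_self h0 (by norm_num)) hfq
      have hd10 : n % 10 < 10 := Nat.mod_lt _ (by norm_num)
      obtain ⟨e, he9, hmde⟩ : ∃ e, e < 9 ∧ md e = n % 10 := by
        by_cases h3 : n % 10 < 3
        · exact ⟨n % 10, by omega, by unfold md; rw [if_pos h3]⟩
        · refine ⟨n % 10 - 1, by omega, ?_⟩
          unfold md
          rw [if_neg (by omega)]
          omega
      refine ⟨9 * k' + e, ?_⟩
      have hkne : 9 * k' + e ≠ 0 := by
        intro h
        have hk0 : k' = 0 ∧ e = 0 := by omega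
        have hq0 : n / 10 = 0 := by rw [← hk', hk0.1, u_zero]
        have he0 : md e = 0 := by rw [hk0.2]; decide
        omega
      rw [u_rec, if_neg hkne]
      have h1 : (9 * k' + e) / 9 = k' := by omega
      have h2 : (9 * k' + e) % 9 = e := by omega
      rw [h1, h2, hk', hmde]
      omega

lemma cnt_succ (n : Nat) : cnt (n + 1) = cnt n + if bFree n then 1 else 0 := by
  simp [cnt, Nat.count_succ]

lemma cnt_zero : cnt 0 = 0 := by simp [cnt]

lemma cnt_step (b : Nat) : ∀ a, a < b → (∀ m, a < m → m < b → bFree m = false) →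
    bFree a = true → cnt b = cnt a + 1 := by
  induction b with
  | zero => intro a ha _ _; omega
  | succ b ih =>
    intro a ha h hf
    rcases Nat.lt_or_ge a b with hab | hab
    · have hb : bFree b = false := h b (by omega) (by omega)
      rw [cnt_succ, hb, ih a hab (fun m h1 h2 => h m h1 (by omega)) hf]
      simp
    · have : a = b := by omega
      subst this
      rw [cnt_succ, hf]
      simp

lemma cnt_u (k : Nat) : cnt (u k) = k := by
  induction k with
  | zero => rw [u_zero, cnt_zero]
  | succ k ih =>
    have hmid : ∀ m, u k < m → m < u (k + 1) → bFree m = false := by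
      intro m h1 h2
      by_contra hb
      have hb' : bFree m = true := by
        cases h : bFree m
        · exact absurd h hb
        · rfl
      obtain ⟨j, hj⟩ := u_surj m hb'
      subst hj
      have : k < j := u_lt_iff.mp h1
      have : j < k + 1 := u_lt_iff.mp h2
      omega
    rw [cnt_step (u (k + 1)) (u k) (u_strictMono (by omega)) hmid (u_free k), ih]

lemma u_cnt_of_free (i : Nat) (h : bFree i = true) : u (cnt i) = i := by
  obtain ⟨k, hk⟩ := u_surj i h
  rw [← hk, cnt_u]

lemma le_u_cnt (i : Nat) : i ≤ u (cnt i) := by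
  induction i with
  | zero => omega
  | succ i ih =>
    cases hb : bFree i
    · have hcc : cnt (i + 1) = cnt i := by rw [cnt_succ, hb]; simp
      rw [hcc]
      have hne : u (cnt i) ≠ i := by
        intro h
        have hfi := u_free (cnt i)
        rw [h, hb] at hfi
        exact Bool.false_ne_true hfi
      omega
    · have hcc : cnt (i + 1) = cnt i + 1 := by rw [cnt_succ, hb]; simp
      rw [hcc]
      have := u_cnt_of_free i hb
      have h2 : u (cnt i) < u (cnt i + 1) := u_strictMono (by omega)
      omega

-- ---- B's pieces compute cnt and u ----

lemma bUnrankLoop_eq (k : Nat) : ∀ ans mult : Int,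
    bUnrankLoop k ans mult = ans + mult * (u k : Int) := by
  induction k using Nat.strong_induction_on with
  | _ k ih =>
    intro ans mult
    rcases Nat.eq_zero_or_pos k with h0 | h0
    · subst h0
      show bUnrankAux 0 0 ans mult = _
      rw [u_zero]
      simp [bUnrankAux]
    · have hk : k ≠ 0 := by omega
      rw [bUnrankLoop_rec k ans mult hk,
        ih (k / 9) (Nat.div_lt_self h0 (by norm_num))]
      have hmd : (if ((k % 9 : Nat) : Int) < 3 then ((k % 9 : Nat) : Int) else ((k % 9 : Nat) : Int) + 1)
          = (md (k % 9) : Int) := by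
        unfold md; split_ifs <;> push_cast <;> omega
      rw [hmd, u_rec k, if_neg hk]
      push_cast
      ring

lemma bCountFree_succ (n : Nat) :
    bCountFree (n + 1) = bCountFree n + if bFree n then 1 else 0 := by
  induction n using Nat.strong_induction_on with
  | _ n ih =>
    rcases Nat.eq_zero_or_pos n with h0 | h0
    · subst h0; decide
    · have hn : n ≠ 0 := by omega
      have hd10 : n % 10 < 10 := Nat.mod_lt _ (by norm_num)
      have hfn : bFree n = ((n % 10 != 3) && bFree (n / 10)) := bFree_rec n hn
      rcases Nat.lt_or_ge (n % 10) 9 with hd9 | hd9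
      · -- no carry: (n+1)/10 = n/10, (n+1)%10 = n%10 + 1
        have hq : (n + 1) / 10 = n / 10 := by omega
        have hr : (n + 1) % 10 = n % 10 + 1 := by omega
        rw [bCountFree_rec (n + 1) (by omega), bCountFree_rec n hn, hq, hr, hfn]
        cases hfq : bFree (n / 10) <;> simp only [hfq, if_true, if_false, Bool.and_true,
          Bool.and_false] <;> split_ifs <;> simp_all <;> omega
      · -- carry: n % 10 = 9, (n+1)/10 = n/10 + 1, (n+1)%10 = 0
        have hd : n % 10 = 9 := by omega
        have hq : (n + 1) / 10 = n / 10 + 1 := by omega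
        have hr : (n + 1) % 10 = 0 := by omega
        have hqlt : n / 10 < n := Nat.div_lt_self h0 (by norm_num)
        rw [bCountFree_rec (n + 1) (by omega), hq, hr,
          bCountFree_rec n hn, hd, hfn, hd, ih (n / 10) hqlt]
        cases hfq : bFree (n / 10) <;> simp [hfq] <;> omega

lemma bCountFree_eq_cnt (n : Nat) : bCountFree n = cnt n := by
  induction n with
  | zero => rw [cnt_zero]; rfl
  | succ n ih => rw [bCountFree_succ, cnt_succ, ih]

-- ---- the zawiera3 bridge: A's string test is the digit test ----

lemma toDigitsCore_eq (fuel : Nat) : ∀ (n : Nat) (ds : List Char), n < fuel → 0 < n →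
    Nat.toDigitsCore 10 fuel n ds = ((Nat.digits 10 n).map Nat.digitChar).reverse ++ ds := by
  induction fuel with
  | zero => intro n ds h _; omega
  | succ fuel ih =>
    intro n ds hlt hpos
    have hstep : Nat.toDigitsCore 10 (fuel + 1) n ds =
        (if n / 10 = 0 then Nat.digitChar (n % 10) :: ds
         else Nat.toDigitsCore 10 fuel (n / 10) (Nat.digitChar (n % 10) :: ds)) := by
      simp only [Nat.toDigitsCore]
    rw [hstep, Nat.digits_def' (by norm_num : (1 : Nat) < 10) hpos]
    by_cases hq : n / 10 = 0
    · rw [if_pos hq, hq]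
      simp
    · rw [if_neg hq]
      have hqlt : n / 10 < n := Nat.div_lt_self hpos (by norm_num)
      rw [ih (n / 10) _ (by omega) (by omega)]
      simp

lemma toDigits_eq (n : Nat) (hn : 0 < n) :
    Nat.toDigits 10 n = ((Nat.digits 10 n).map Nat.digitChar).reverse := by
  have := toDigitsCore_eq (n + 1) n [] (by omega) hn
  simpa [Nat.toDigits] using this

lemma ofChars_digitChar (d : Nat) (h : d < 10) :
    PySem.Int.ofChars? [Nat.digitChar d] = some (d : Int) := by
  interval_cases d <;> decide

lemma digitChar_three (d : Nat) (h : d < 10) : Nat.digitChar d = '3' ↔ d = 3 := by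
  interval_cases d <;> decide

-- the for-loop of zawiera3 over a digit string, scanning suffix cs at offset pre.length
lemma zloop (cs : List Char) : ∀ pre : List Char,
    (∀ c ∈ cs, ∃ d, d < 10 ∧ c = Nat.digitChar d) →
    zawiera3Loop (String.ofList (pre ++ cs))
      (PySem.List.pyRange (pre.length : Int) ((pre.length : Int) + (cs.length : Int)) 1) =
      some (cs.contains '3') := by
  induction cs with
  | nil =>
    intro pre _
    rw [PySem.List.pyRange_one_eq_nil (by simp)]
    rfl
  | cons c cs ih =>
    intro pre hdig
    obtain ⟨d, hd10, hcd⟩ := hdig c (List.mem_cons_self)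
    rw [PySem.List.pyRange_one_cons (by push_cast [List.length_cons]; omega)]
    have hget : PySem.Str.pyGet? (String.ofList (pre ++ c :: cs)) (pre.length : Int) = some c := by
      rw [PySem.Str.pyGet?_natCast]
      simp
    have hof : PySem.Int.ofChars? [c] = some (d : Int) := by
      rw [hcd]
      exact ofChars_digitChar d hd10
    simp only [zawiera3Loop, hget, hof]
    by_cases h3 : d = 3
    · subst h3
      have : ((3 : Nat) : Int) = 3 := by norm_num
      rw [this, if_pos rfl]
      simp only [List.contains_cons, Option.some.injEq]
      have h33 : ('3' == c) = true := by rw [hcd]; decide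
      rw [h33, Bool.true_or]
    · rw [if_neg (by exact_mod_cast h3)]
      have hc3 : c ≠ '3' := by
        rw [hcd]
        intro hx
        exact h3 ((digitChar_three d hd10).mp hx)
      have hb : ('3' == c) = false := by simp [Ne.symm hc3]
      have hres : (c :: cs).contains '3' = cs.contains '3' := by
        simp only [List.contains_cons, hb, Bool.false_or]
      rw [hres]
      have hih := ih (pre ++ [c]) (fun x hx => hdig x (List.mem_cons_of_mem _ hx))
      have e1 : (pre ++ [c]) ++ cs = pre ++ c :: cs := by simp
      have e2 : (((pre ++ [c]).length : Nat) : Int) = (pre.length : Int) + 1 := by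
        push_cast [List.length_append, List.length_singleton]
        ring
      rw [e1, e2] at hih
      have e3 : (pre.length : Int) + 1 + (cs.length : Int) =
          (pre.length : Int) + ((cs.length : Int) + 1) := by ring
      rw [e3] at hih
      have e4 : ((c :: cs).length : Int) = (cs.length : Int) + 1 := by
        push_cast [List.length_cons]
        ring
      rw [e4]
      exact hih

lemma toDigits_digits (n : Nat) :
    ∀ c ∈ Nat.toDigits 10 n, ∃ d, d < 10 ∧ c = Nat.digitChar d := by
  rcases Nat.eq_zero_or_pos n with h0 | h0
  · subst h0
    intro c hc
    simp only [show Nat.toDigits 10 0 = ['0'] from by decide, List.mem_singleton] at hc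
    exact ⟨0, by omega, by rw [hc]; rfl⟩
  · rw [toDigits_eq n h0]
    intro c hc
    rw [List.mem_reverse, List.mem_map] at hc
    obtain ⟨d, hd, rfl⟩ := hc
    exact ⟨d, Nat.digits_lt_base (by norm_num) hd, rfl⟩

lemma toDigits_contains (n : Nat) : (Nat.toDigits 10 n).contains '3' = !bFree n := by
  have hiff : (Nat.toDigits 10 n).contains '3' = true ↔ 3 ∈ Nat.digits 10 n := by
    rcases Nat.eq_zero_or_pos n with h0 | h0
    · subst h0; decide
    · rw [toDigits_eq n h0]
      simp only [List.contains_eq_mem, List.mem_reverse, List.mem_map, decide_eq_true_eq]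
      constructor
      · rintro ⟨d, hd, hdc⟩
        rwa [← (digitChar_three d (Nat.digits_lt_base (by norm_num) hd)).mp hdc]
      · intro h3
        exact ⟨3, h3, rfl⟩
  have hfree := bFree_iff n
  cases hb : bFree n <;> cases hc : (Nat.toDigits 10 n).contains '3' <;> simp_all

lemma zawiera3_eq (n : Nat) : zawiera3 (n : Int) = some (!bFree n) := by
  have hnn : ¬ ((n : Int) < 0) := by omega
  have htc : PySem.Int.toChars (n : Int) = Nat.toDigits 10 n := by
    unfold PySem.Int.toChars
    rw [if_neg hnn]
    simp
  have hts : PySem.Int.toStr (n : Int) = String.ofList (Nat.toDigits 10 n) := by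
    unfold PySem.Int.toStr
    rw [htc]
  unfold zawiera3
  rw [hts]
  show zawiera3Loop (String.ofList (Nat.toDigits 10 n))
      (PySem.List.pyRange 0 (PySem.Str.len (String.ofList (Nat.toDigits 10 n))) 1) =
    some (!bFree n)
  have hlen : PySem.Str.len (String.ofList (Nat.toDigits 10 n)) =
      ((Nat.toDigits 10 n).length : Int) := by
    rw [PySem.Str.len_eq]
    simp
  rw [hlen]
  have hz := zloop (Nat.toDigits 10 n) [] (toDigits_digits n)
  simp only [List.nil_append, List.length_nil, Nat.cast_zero, zero_add] at hz
  rw [hz, toDigits_contains]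

-- ---- A's loop returns u (cnt i + (w - licznik - 1)) when it is in range ----

lemma aloop_spec (fuel : Nat) : ∀ (i : Nat) (c w : Int),
    kolejna1Loop w c (i : Int) fuel =
      if c < w ∧ u (cnt i + (w - c - 1).toNat) < i + fuel
      then ((u (cnt i + (w - c - 1).toNat) : Nat) : Int) else 0 := by
  induction fuel with
  | zero =>
    intro i c w
    rw [if_neg]
    · simp [kolejna1Loop]
    · rintro ⟨-, h2⟩
      have h1 : i ≤ u (cnt i) := le_u_cnt i
      have h3 : u (cnt i) ≤ u (cnt i + (w - c - 1).toNat) := u_mono (by omega)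
      omega
  | succ fuel ih =>
    intro i c w
    have hz := zawiera3_eq i
    simp only [kolejna1Loop, hz]
    have hcast : ((i : Int) + 1) = (((i + 1 : Nat) : Nat) : Int) := by push_cast; ring
    cases hb : bFree i
    · -- digit 3 present: counter unchanged
      simp only [Bool.not_false]
      rw [hcast, ih (i + 1) c w]
      have hcnt : cnt (i + 1) = cnt i := by rw [cnt_succ, hb]; simp
      have hfuel : i + 1 + fuel = i + (fuel + 1) := by omega
      rw [hcnt, hfuel]
    · -- 3-free: counter bumps, possibly returns i
      simp only [Bool.not_true]
      by_cases hcw : c + 1 = w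
      · have h0 : (w - c - 1).toNat = 0 := by omega
        rw [if_pos hcw, h0]
        simp only [Nat.add_zero, u_cnt_of_free i hb]
        rw [if_pos ⟨(by omega : c < w), (by omega : i < i + (fuel + 1))⟩]
      · rw [if_neg hcw, hcast, ih (i + 1) (c + 1) w]
        have hcnt : cnt (i + 1) = cnt i + 1 := by rw [cnt_succ, hb]; simp
        rw [hcnt]
        by_cases hlt : c + 1 < w
        · have e1 : cnt i + 1 + (w - (c + 1) - 1).toNat = cnt i + (w - c - 1).toNat := by omega
          have e2 : i + 1 + fuel = i + (fuel + 1) := by omega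
          rw [e1, e2]
          exact if_congr ⟨fun ⟨h1, h2⟩ => ⟨by omega, h2⟩, fun ⟨h1, h2⟩ => ⟨by omega, h2⟩⟩ rfl rfl
        · rw [if_neg (by rintro ⟨h1, -⟩; omega), if_neg (by rintro ⟨h1, -⟩; omega)]

-- ===== VERDICT (by name: the statement is the Claim_ definition above) =====
theorem kolejna1_spec : Claim_equal_kolejna1 := by
  intro p w _ hpre
  unfold Spec_kolejna1
  have hpre' : -1 ≤ p := hpre
  obtain ⟨i0, hi0⟩ : ∃ i0 : Nat, (p + 1 : Int) = (i0 : Int) := ⟨(p + 1).toNat, by omega⟩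
  by_cases hw : w < 1
  · -- w < 1: the counter never reaches w, both return 0
    have hB : kolejna1_alt p w = 0 := by
      unfold kolejna1_alt
      rw [if_pos hw]
    rw [hB]
    unfold kolejna1
    rw [hi0, aloop_spec]
    rw [if_neg]
    rintro ⟨h1, -⟩
    omega
  · -- w ≥ 1
    have hc : (if 0 ≤ p then ((bCountFree (p + 1).toNat : Nat) : Int) else 0)
        = ((cnt i0 : Nat) : Int) := by
      by_cases hp0 : 0 ≤ p
      · rw [if_pos hp0, bCountFree_eq_cnt]
        congr 2
        omega
      · rw [if_neg hp0]
        have h00 : i0 = 0 := by omega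
        rw [h00, cnt_zero]
        simp
    have hkt : (((cnt i0 : Nat) : Int) + w - 1).toNat = cnt i0 + (w - 1).toNat := by omega
    have hB : kolejna1_alt p w =
        (if ((u (cnt i0 + (w - 1).toNat) : Nat) : Int) < 1000000
         then ((u (cnt i0 + (w - 1).toNat) : Nat) : Int) else 0) := by
      unfold kolejna1_alt
      rw [if_neg hw]
      simp only [hc, hkt, bUnrankLoop_eq]
      simp
    rw [hB]
    unfold kolejna1
    rw [hi0, aloop_spec]
    have hsub : w - 0 - 1 = w - 1 := by ring
    rw [hsub]
    have hUge : i0 ≤ u (cnt i0 + (w - 1).toNat) :=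
      le_trans (le_u_cnt i0) (u_mono (by omega))
    by_cases hbig : i0 ≤ 1000000
    · have hfe : i0 + ((1000000 : Int) - (i0 : Int)).toNat = 1000000 := by omega
      rw [hfe]
      by_cases hu : u (cnt i0 + (w - 1).toNat) < 1000000
      · rw [if_pos ⟨by omega, hu⟩, if_pos (by exact_mod_cast hu)]
      · rw [if_neg (by rintro ⟨-, h2⟩; omega),
          if_neg (by intro h2; exact hu (by exact_mod_cast h2))]
    · have hf0 : ((1000000 : Int) - (i0 : Int)).toNat = 0 := by omega
      rw [hf0]
      rw [if_neg (by rintro ⟨-, h2⟩; omega),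
        if_neg (by intro h2; omega)]
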